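-- pv_equiv track=rewrite | github.com/owenhowell20/Induced-and-Restriction-Representations-for-ML | represenations_opps.py | compute_tensor_SO3_l_fold
-- ===== SOURCE A (Python) =====
-- def compute_tensor_SO3( l1 , l2 ):
--     l1 = int(l1)
--     l2 = int(l2)
--     rep_out = {}
--
--     for i in range(  abs( l1 - l2 ) , l1 + l2  + 1  ):
--         rep_out[i] = 1
--
--     return rep_out
--
-- def compute_tensor_SO3_l_fold( rep_dict , l ):
--     if l==0:
--         return rep_dict
--
--     rep_out = {}
--
--     for k2 in rep_dict.keys():
--
--         multplicity = int( rep_dict[ k2 ] )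
--
--         ### if non-zero, contains one copy of each SO(2) irr
--         if ( multplicity != 0 ):
--
--             tp = compute_tensor_SO3( l , k2 )
--
--             for out in tp.keys():
--
--                 try:
--                     rep_out[out] = rep_out[out] + int(multplicity)*int(tp[out])
--
--                 except:
--
--                     rep_out[out] = int(multplicity)*int(tp[out])
--
--     return rep_out
-- ===== SOURCE B (Python) =====
-- def compute_tensor_SO3_l_fold(rep_dict, l):
--     if l == 0:
--         return rep_dict
--     # nonzero entries as half-open weighted intervals [a, b) of output irreps
--     triples = [(abs(l - int(k2)), l + int(k2) + 1, int(m))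
--                for k2, m in rep_dict.items() if int(m) != 0]
--     # output keys in first-occurrence order over the concatenated ranges
--     keys = []
--     seen = set()
--     for a, b, _ in triples:
--         for x in range(a, b):
--             if x not in seen:
--                 seen.add(x)
--                 keys.append(x)
--     # multiplicity of key x: closed-form sum over the intervals covering x
--     return {x: sum(m for a, b, m in triples if a <= x < b) for x in keys}
-- ===== Notes on version B (the rewrite author's own statement) =====
-- stated objective: alternative
-- what changed: A builds the output dict incrementally (a helper all-ones dict per entry, try/except accumulation); B instead collects the output keys once by a seen-set first-occurrence scan over the intervals and computes each key's multiplicity by a closed-form sum over the intervals covering it, building the result dict in a single comprehension.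
import Mathlib
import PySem

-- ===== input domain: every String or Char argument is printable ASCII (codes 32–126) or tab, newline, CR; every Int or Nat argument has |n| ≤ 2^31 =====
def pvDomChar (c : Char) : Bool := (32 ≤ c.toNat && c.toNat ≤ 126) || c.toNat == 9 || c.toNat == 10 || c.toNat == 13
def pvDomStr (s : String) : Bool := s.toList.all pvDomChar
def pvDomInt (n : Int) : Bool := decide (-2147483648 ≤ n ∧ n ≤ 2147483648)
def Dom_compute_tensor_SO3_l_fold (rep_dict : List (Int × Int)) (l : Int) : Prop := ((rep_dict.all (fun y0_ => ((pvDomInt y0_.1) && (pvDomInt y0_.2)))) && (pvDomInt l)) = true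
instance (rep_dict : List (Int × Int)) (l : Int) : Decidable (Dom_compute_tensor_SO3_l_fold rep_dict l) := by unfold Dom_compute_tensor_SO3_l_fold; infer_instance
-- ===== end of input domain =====

-- B replaces A's incremental output dict (helper dicts of ones, try/except accumulation) by a
-- first-occurrence key scan plus a closed-form multiplicity sum per key (objective: alternative).

-- ===== PORT A =====
-- helper: compute_tensor_SO3(l1, l2) — dict {i: 1 for i in range(abs(l1-l2), l1+l2+1)}
def compute_tensor_SO3 (l1 l2 : Int) : PySem.Dict Int Int :=
  (PySem.List.pyRange (|l1 - l2|) (l1 + l2 + 1) 1).foldl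
    (fun rep_out i => rep_out.insert i 1) PySem.Dict.empty

def compute_tensor_SO3_l_fold (rep_dict : List (Int × Int)) (l : Int) : List (Int × Int) :=
  let d := PySem.Dict.ofList rep_dict
  if l = 0 then d.items
  else
    (d.keys.foldl (fun rep_out k2 =>
        let m := d.getD k2 0
        if m ≠ 0 then
          (compute_tensor_SO3 l k2).items.foldl (fun acc p =>
            -- try: rep_out[out] += m*tp[out]  except: rep_out[out] = m*tp[out]
            match acc.get? p.1 with
            | some old => acc.insert p.1 (old + m * p.2)
            | none     => acc.insert p.1 (m * p.2)) rep_out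
        else rep_out)
      PySem.Dict.empty).items

-- ===== PORT B =====
def compute_tensor_SO3_l_fold_alt (rep_dict : List (Int × Int)) (l : Int) : List (Int × Int) :=
  let d := PySem.Dict.ofList rep_dict
  if l = 0 then d.items
  else
    -- nonzero entries as half-open weighted intervals [a, b)
    let triples : List (Int × Int × Int) :=
      d.items.filterMap (fun p => if p.2 ≠ 0 then some (|l - p.1|, l + p.1 + 1, p.2) else none)
    -- output keys in first-occurrence order over the concatenated ranges (seen-set dedup)
    let keys : PySem.Set Int :=
      triples.foldl (fun s t => (PySem.List.pyRange t.1 t.2.1 1).foldl PySem.Set.add s)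
        PySem.Set.empty
    -- multiplicity of key x: closed-form sum over the intervals covering x
    keys.map (fun x =>
      (x, triples.foldl (fun acc t => acc + (if t.1 ≤ x ∧ x < t.2.1 then t.2.2 else 0)) 0))

-- ===== PRECONDITION & SPEC =====
def Spec_compute_tensor_SO3_l_fold (rep_dict : List (Int × Int)) (l : Int) (out : List (Int × Int)) : Prop := out = compute_tensor_SO3_l_fold_alt rep_dict l
instance (rep_dict : List (Int × Int)) (l : Int) (out : List (Int × Int)) : Decidable (Spec_compute_tensor_SO3_l_fold rep_dict l out) := by unfold Spec_compute_tensor_SO3_l_fold; infer_instance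

-- ===== CLAIM (what is proved, stated in full; the proofs are below) =====
def Claim_equal_compute_tensor_SO3_l_fold : Prop := ∀ (rep_dict : List (Int × Int)) (l : Int), Dom_compute_tensor_SO3_l_fold rep_dict l → Spec_compute_tensor_SO3_l_fold rep_dict l (compute_tensor_SO3_l_fold rep_dict l)

-- ===== LEMMAS AND PROOFS =====

-- the helper dict is the range with value 1 everywhere
theorem tp_items (l k2 : Int) :
    (compute_tensor_SO3 l k2).items
      = (PySem.List.pyRange (|l - k2|) (l + k2 + 1) 1).map (fun i => (i, (1 : Int))) := by
  unfold compute_tensor_SO3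
  have h := PySem.Dict.items_foldl_insert_fresh
      (PySem.List.pyRange (|l - k2|) (l + k2 + 1) 1) (fun i => i) (fun _ => (1 : Int))
      PySem.Dict.empty
      (fun a _ => PySem.Dict.contains_empty a)
      (by simpa using PySem.List.nodup_pyRange_one (|l - k2|) (l + k2 + 1))
  simpa using h

-- A's try/except update is d[x] = d.get(x, 0) + w
theorem step_modify (w : Int) (d : PySem.Dict Int Int) (x : Int) :
    (match d.get? x with
     | some old => d.insert x (old + w)
     | none     => d.insert x w) = d.modify x 0 (· + w) := by
  unfold PySem.Dict.modify
  cases h : d.get? x with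
  | some old => simp [PySem.Dict.getD_eq_get?_getD, h]
  | none => simp [PySem.Dict.getD_eq_get?_getD, h]

-- A's inner loop over the helper dict is a weighted-counter loop over the range
theorem inner_eq (m : Int) (r : List Int) (d : PySem.Dict Int Int) :
    (r.map (fun i => (i, (1 : Int)))).foldl (fun acc p =>
        match acc.get? p.1 with
        | some old => acc.insert p.1 (old + m * p.2)
        | none     => acc.insert p.1 (m * p.2)) d
      = r.foldl (fun acc x => acc.modify x 0 (· + m)) d := by
  rw [List.foldl_map]
  apply PySem.List.foldl_congr_mem
  intro acc x _
  simpa [mul_one] using step_modify m acc x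

theorem count_pyRange (a b v : Int) :
    ((PySem.List.pyRange a b 1).count v : Int) = if a ≤ v ∧ v < b then 1 else 0 := by
  by_cases h : v ∈ PySem.List.pyRange a b 1
  · rw [List.count_eq_one_of_mem (PySem.List.nodup_pyRange_one a b) h]
    simp [PySem.List.mem_pyRange_one.mp h]
  · rw [List.count_eq_zero_of_not_mem h]
    simp [PySem.List.mem_pyRange_one.not.mp h]

theorem getD_inner (m : Int) (r : List Int) (d : PySem.Dict Int Int) (v : Int) :
    (r.foldl (fun acc x => acc.modify x 0 (· + m)) d).getD v 0
      = d.getD v 0 + m * r.count v := by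
  induction r generalizing d with
  | nil => simp
  | cons x xs ih =>
    rw [List.foldl_cons, ih, PySem.Dict.getD_modify, List.count_cons]
    push_cast
    by_cases hv : v = x
    · simp [hv]; ring
    · simp [hv]; tauto

-- the weight key x receives from one interval
def pvWeight (x : Int) (t : Int × Int × Int) : Int :=
  if t.1 ≤ x ∧ x < t.2.1 then t.2.2 else 0

-- the outer accumulation over all intervals, A's shape
def pvOuter (E : List (Int × Int × Int)) (d : PySem.Dict Int Int) : PySem.Dict Int Int :=
  E.foldl (fun rep t =>
    (PySem.List.pyRange t.1 t.2.1 1).foldl (fun acc x => acc.modify x 0 (· + t.2.2)) rep) d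

theorem keys_pvOuter (E : List (Int × Int × Int)) (d : PySem.Dict Int Int) :
    (pvOuter E d).keys
      = E.foldl (fun s t => (PySem.List.pyRange t.1 t.2.1 1).foldl PySem.Set.add s) d.keys := by
  induction E generalizing d with
  | nil => rfl
  | cons t E ih =>
    unfold pvOuter at *
    rw [List.foldl_cons, List.foldl_cons, ih]
    congr 1
    simpa [PySem.Set.update] using
      PySem.Dict.keys_foldl_modify (PySem.List.pyRange t.1 t.2.1 1) 0
        (fun _ _ => (· + t.2.2)) d

theorem nodup_keys_pvOuter (E : List (Int × Int × Int)) (d : PySem.Dict Int Int)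
    (h : d.keys.Nodup) : (pvOuter E d).keys.Nodup := by
  induction E generalizing d with
  | nil => exact h
  | cons t E ih =>
    unfold pvOuter at *
    rw [List.foldl_cons]
    exact ih _ (PySem.Dict.nodup_keys_foldl_modify_key
      (PySem.List.pyRange t.1 t.2.1 1) (fun x => x) 0 (fun _ _ => (· + t.2.2)) d h)

theorem getD_pvOuter (E : List (Int × Int × Int)) (d : PySem.Dict Int Int) (v : Int) :
    (pvOuter E d).getD v 0 = d.getD v 0 + (E.map (pvWeight v)).sum := by
  induction E generalizing d with
  | nil => simp [pvOuter]
  | cons t E ih =>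
    unfold pvOuter at *
    rw [List.foldl_cons, ih, getD_inner]
    rw [List.map_cons, List.sum_cons]
    have : t.2.2 * ((PySem.List.pyRange t.1 t.2.1 1).count v : Int) = pvWeight v t := by
      rw [count_pyRange]
      unfold pvWeight
      split_ifs <;> ring
    rw [this]; ring

-- ===== VERDICT (by name: the statement is the Claim_ definition above) =====
theorem compute_tensor_SO3_l_fold_spec : Claim_equal_compute_tensor_SO3_l_fold := by
  intro rep_dict l _
  unfold Spec_compute_tensor_SO3_l_fold
  unfold compute_tensor_SO3_l_fold compute_tensor_SO3_l_fold_alt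
  set d := PySem.Dict.ofList rep_dict with hd
  by_cases hl : l = 0
  · simp [hl]
  · simp only [hl, if_false]
    -- step 1: A's fold over keys with getD-lookups = pvOuter over the filtered triples
    have hkeysmap : d.keys = d.items.map Prod.fst := rfl
    have hnd : d.keys.Nodup := PySem.Dict.nodup_keys_ofList rep_dict
    have hA :
        d.keys.foldl (fun rep_out k2 =>
          let m := d.getD k2 0
          if m ≠ 0 then
            (compute_tensor_SO3 l k2).items.foldl (fun acc p =>
              match acc.get? p.1 with
              | some old => acc.insert p.1 (old + m * p.2)
              | none     => acc.insert p.1 (m * p.2)) rep_out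
          else rep_out) PySem.Dict.empty
        = pvOuter (d.items.filterMap (fun p =>
            if p.2 ≠ 0 then some (|l - p.1|, l + p.1 + 1, p.2) else none)) PySem.Dict.empty := by
      rw [hkeysmap, List.foldl_map]
      unfold pvOuter
      rw [List.foldl_filterMap]
      apply PySem.List.foldl_congr_mem
      intro acc p hp
      have hval : d.getD p.1 0 = p.2 :=
        PySem.Dict.getD_of_mem_items d (by exact hp) hnd 0
      by_cases hz : p.2 = 0
      · simp [hval, hz]
      · simp only [hval, hz, if_pos, ne_eq, not_false_iff]
        rw [tp_items, inner_eq]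
    rw [hA]
    -- step 2: items of pvOuter = keys paired with the closed-form sums
    set E := d.items.filterMap (fun p =>
      if p.2 ≠ 0 then some (|l - p.1|, l + p.1 + 1, p.2) else none) with hE
    have hndE : (pvOuter E PySem.Dict.empty).keys.Nodup :=
      nodup_keys_pvOuter E PySem.Dict.empty (by simp [PySem.Dict.keys_empty])
    rw [PySem.Dict.items_eq_map_keys _ hndE 0, keys_pvOuter]
    simp only [PySem.Dict.keys_empty]
    apply List.map_congr_left
    intro x _
    rw [getD_pvOuter, PySem.Dict.getD_empty, zero_add, PySem.List.foldl_add, zero_add]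
    rfl
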